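-- pv_equiv track=rewrite | github.com/10U-Labs/assert-no-inline-directives | src/assert_no_inline_lint_disables/scanner.py | get_linters_for_extension
-- ===== SOURCE A (Python) =====
-- LINTER_EXTENSIONS: dict[str, frozenset[str]] = {
--     "yamllint": frozenset({".yaml", ".yml"}),
--     "pylint": frozenset({".py"}),
--     "mypy": frozenset({".py"}),
-- }
--
-- def get_linters_for_extension(
--     extension: str,
--     linters: frozenset[str],
-- ) -> frozenset[str]:
--     """Get linters that apply to a specific file extension.
--
--     Args:
--         extension: File extension (including the dot, e.g., ".py").
--         linters: Set of linter names to filter.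
--
--     Returns:
--         Frozenset of linters that apply to this extension.
--     """
--     ext_lower = extension.lower()
--     return frozenset(
--         linter for linter in linters
--         if ext_lower in LINTER_EXTENSIONS.get(linter, frozenset())
--     )
-- ===== SOURCE B (Python) =====
-- LINTER_EXTENSIONS: dict[str, frozenset[str]] = {
--     "yamllint": frozenset({".yaml", ".yml"}),
--     "pylint": frozenset({".py"}),
--     "mypy": frozenset({".py"}),
-- }
--
--
-- def _build_ext_index() -> dict[str, frozenset[str]]:
--     index: dict[str, set[str]] = {}
--     for linter, exts in LINTER_EXTENSIONS.items():
--         for ext in exts: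
--             index.setdefault(ext, set()).add(linter)
--     return {ext: frozenset(names) for ext, names in index.items()}
--
--
-- EXT_TO_LINTERS: dict[str, frozenset[str]] = _build_ext_index()
--
--
-- def get_linters_for_extension(
--     extension: str,
--     linters: frozenset[str],
-- ) -> frozenset[str]:
--     applicable = EXT_TO_LINTERS.get(extension.lower(), frozenset())
--     return frozenset(linters) & applicable
-- ===== Notes on version B (the rewrite author's own statement) =====
-- stated objective: faster
-- what changed: B precomputes an inverted index EXT_TO_LINTERS (extension -> linter names) once from LINTER_EXTENSIONS and answers each query by a single dict lookup plus one C-level set intersection, instead of scanning every input linter with a per-element dict probe and membership test.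
import Mathlib
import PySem

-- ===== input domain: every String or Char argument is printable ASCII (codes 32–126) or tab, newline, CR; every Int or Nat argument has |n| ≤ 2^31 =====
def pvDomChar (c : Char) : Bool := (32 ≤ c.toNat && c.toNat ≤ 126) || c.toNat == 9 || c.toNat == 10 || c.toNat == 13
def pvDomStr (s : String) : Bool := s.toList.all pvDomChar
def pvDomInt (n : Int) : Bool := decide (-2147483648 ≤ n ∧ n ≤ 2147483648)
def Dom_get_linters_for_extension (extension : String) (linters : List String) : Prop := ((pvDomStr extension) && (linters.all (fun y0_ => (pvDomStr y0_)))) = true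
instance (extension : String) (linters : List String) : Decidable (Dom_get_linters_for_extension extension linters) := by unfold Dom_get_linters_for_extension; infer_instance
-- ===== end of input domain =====

-- B replaces A's per-linter dict probe with an inverted index (extension -> linter names) built once
-- from LINTER_EXTENSIONS, answering by one lookup plus a set intersection (idiomatic; return sets are equal).

-- ===== PORT A =====
def LINTER_EXTENSIONS : PySem.Dict String (PySem.Set String) :=
  ⟨[("yamllint", PySem.Set.ofList [".yaml", ".yml"]),
    ("pylint",   PySem.Set.ofList [".py"]),
    ("mypy",     PySem.Set.ofList [".py"])]⟩

def get_linters_for_extension (extension : String) (linters : List String) : List String :=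
  let ext_lower := PySem.Str.lower extension
  PySem.Set.ofList (linters.filter (fun linter =>
    PySem.Set.contains (PySem.Dict.getD LINTER_EXTENSIONS linter PySem.Set.empty) ext_lower))

-- ===== PORT B =====
-- _build_ext_index: fold over LINTER_EXTENSIONS.items, adding each linter to the entry of every
-- extension it supports (setdefault(ext, set()).add(linter)); the final freezing comprehension is the identity here
def EXT_TO_LINTERS : PySem.Dict String (PySem.Set String) :=
  LINTER_EXTENSIONS.items.foldl
    (fun idx p =>
      p.2.foldl (fun idx ext =>
        PySem.Dict.insert idx ext (PySem.Set.add (PySem.Dict.getD idx ext PySem.Set.empty) p.1)) idx)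
    ⟨[]⟩

def get_linters_for_extension_alt (extension : String) (linters : List String) : List String :=
  let applicable := PySem.Dict.getD EXT_TO_LINTERS (PySem.Str.lower extension) PySem.Set.empty
  PySem.Set.inter (PySem.Set.ofList linters) applicable

-- ===== PRECONDITION & SPEC =====
def Spec_get_linters_for_extension (extension : String) (linters : List String) (out : List String) : Prop := out = get_linters_for_extension_alt extension linters
instance (extension : String) (linters : List String) (out : List String) : Decidable (Spec_get_linters_for_extension extension linters out) := by unfold Spec_get_linters_for_extension; infer_instance

-- ===== CLAIM (what is proved, stated in full; the proofs are below) =====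
def Claim_equal_get_linters_for_extension : Prop := ∀ (extension : String) (linters : List String), Dom_get_linters_for_extension extension linters → Spec_get_linters_for_extension extension linters (get_linters_for_extension extension linters)

-- ===== LEMMAS AND PROOFS =====

-- both closed tables, evaluated to their plain association lists
theorem ext_index_eval : EXT_TO_LINTERS = ⟨[(".yaml", ["yamllint"]), (".yml", ["yamllint"]), (".py", ["pylint", "mypy"])]⟩ := by decide

theorem lin_eval : LINTER_EXTENSIONS = ⟨[("yamllint", [".yaml", ".yml"]), ("pylint", [".py"]), ("mypy", [".py"])]⟩ := by decide

-- the two tables answer the same membership question, transposed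
set_option maxHeartbeats 1000000 in
set_option maxRecDepth 4096 in
theorem probe_transpose (l e : String) :
    PySem.Set.contains (PySem.Dict.getD LINTER_EXTENSIONS l PySem.Set.empty) e
      = PySem.Set.contains (PySem.Dict.getD EXT_TO_LINTERS e PySem.Set.empty) l := by
  rw [ext_index_eval, lin_eval]
  by_cases h1 : l = "yamllint" <;> by_cases h2 : l = "pylint" <;> by_cases h3 : l = "mypy" <;>
  by_cases g1 : e = ".yaml" <;> by_cases g2 : e = ".yml" <;> by_cases g3 : e = ".py" <;>
    simp_all [PySem.Dict.getD, PySem.Dict.get?, PySem.Set.contains, PySem.Set.empty, List.find?, beq_eq_decide, eq_comm]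

theorem filter_set_add {α : Type} [BEq α] [LawfulBEq α] (p : α → Bool) (s : PySem.Set α) (x : α) :
    (PySem.Set.add s x).filter p = if p x then PySem.Set.add (s.filter p) x else s.filter p := by
  by_cases hm : x ∈ s <;> by_cases hp : p x <;>
    simp [PySem.Set.add, hm, hp, List.filter_append, List.mem_filter]

theorem filter_foldl_add {α : Type} [BEq α] [LawfulBEq α] (p : α → Bool) (xs : List α) :
    ∀ s : PySem.Set α,
      (xs.foldl PySem.Set.add s).filter p = (xs.filter p).foldl PySem.Set.add (s.filter p) := by
  induction xs with
  | nil => intro s; rfl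
  | cons x xs ih =>
    intro s
    by_cases hp : p x <;>
      simp [List.foldl_cons, ih, filter_set_add, hp]

theorem ofList_filter {α : Type} [BEq α] [LawfulBEq α] (p : α → Bool) (xs : List α) :
    PySem.Set.ofList (xs.filter p) = (PySem.Set.ofList xs).filter p := by
  simpa [PySem.Set.ofList, PySem.Set.empty] using (filter_foldl_add p xs []).symm

-- ===== VERDICT (by name: the statement is the Claim_ definition above) =====
theorem get_linters_for_extension_spec : Claim_equal_get_linters_for_extension := by
  intro extension linters _
  unfold Spec_get_linters_for_extension
  unfold get_linters_for_extension get_linters_for_extension_alt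
  simp only [PySem.Set.inter]
  rw [← ofList_filter]
  congr 1
  apply List.filter_congr
  intro l _
  exact probe_transpose l (PySem.Str.lower extension)
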